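-- pv_equiv track=rewrite | github.com/scludwick/tijuana | extract_region_dictionaries.py | get_testing_subset
-- ===== SOURCE A (Python) =====
-- TEST_N_REGIONS = 2   # Number of Region_Years to process in testing mode
--
-- TEST_MAX_FILES = 5   # Max total files to process in testing mode
--
-- def get_testing_subset(groups):
--     """
--     Select up to TEST_MAX_FILES files from the first TEST_N_REGIONS
--     Region_Years (alphabetical order).
--     """
--     subset = {}
--     total  = 0
--     for key in sorted(groups)[:TEST_N_REGIONS]:
--         subset[key] = []
--         for f in groups[key]:
--             if total >= TEST_MAX_FILES:
--                 break
--             subset[key].append(f)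
--             total += 1
--     return subset
-- ===== SOURCE B (Python) =====
-- TEST_N_REGIONS = 2   # Number of Region_Years to process in testing mode
--
-- TEST_MAX_FILES = 5   # Max total files to process in testing mode
--
-- def get_testing_subset(groups):
--     """
--     Select up to TEST_MAX_FILES files from the first TEST_N_REGIONS
--     Region_Years (alphabetical order).
--     """
--     subset = {}
--     remaining = TEST_MAX_FILES
--     for key in sorted(groups)[:TEST_N_REGIONS]:
--         chunk = groups[key][:remaining]
--         subset[key] = list(chunk)
--         remaining -= len(chunk)
--     return subset
-- ===== Notes on version B (the rewrite author's own statement) =====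
-- stated objective: simpler
-- what changed: Replaces the inner per-file append loop with its running total and break by a decreasing budget 'remaining' and a single slice groups[key][:remaining] per key.
import Mathlib
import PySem

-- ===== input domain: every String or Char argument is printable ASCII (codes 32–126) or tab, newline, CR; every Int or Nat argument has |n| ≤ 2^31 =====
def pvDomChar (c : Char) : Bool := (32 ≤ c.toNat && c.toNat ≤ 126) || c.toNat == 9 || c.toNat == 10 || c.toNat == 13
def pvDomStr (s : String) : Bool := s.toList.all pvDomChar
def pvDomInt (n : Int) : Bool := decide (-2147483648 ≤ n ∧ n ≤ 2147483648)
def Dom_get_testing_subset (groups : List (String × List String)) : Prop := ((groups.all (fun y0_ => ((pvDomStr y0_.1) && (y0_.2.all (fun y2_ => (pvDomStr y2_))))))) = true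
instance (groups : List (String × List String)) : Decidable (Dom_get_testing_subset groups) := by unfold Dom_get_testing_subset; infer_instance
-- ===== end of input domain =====

-- B replaces A's inner append loop (counter `total` + break) by a decreasing budget and one slice per key; objective: simpler.

-- ===== PORT A =====
-- inner 'for f in groups[key]' loop of A: appends to acc, counting in t, breaking at TEST_MAX_FILES = 5
def pvInnerA : List String → List String → Nat → List String × Nat
  | [], acc, t => (acc, t)
  | f :: rest, acc, t => if 5 ≤ t then (acc, t) else pvInnerA rest (acc ++ [f]) (t + 1)

def get_testing_subset (groups : List (String × List String)) : List (String × List String) :=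
  let d := PySem.Dict.ofList groups
  let ks := (PySem.List.sorted d.keys (fun k => k) false).take 2
  (ks.foldl (fun (st : PySem.Dict String (List String) × Nat) k =>
      let r := pvInnerA (d.getD k []) [] st.2
      (st.1.insert k r.1, r.2)) (PySem.Dict.empty, 0)).1.items

-- ===== PORT B =====
def get_testing_subset_alt (groups : List (String × List String)) : List (String × List String) :=
  let d := PySem.Dict.ofList groups
  let ks := (PySem.List.sorted d.keys (fun k => k) false).take 2
  (ks.foldl (fun (st : PySem.Dict String (List String) × Nat) k =>
      let chunk := (d.getD k []).take st.2
      (st.1.insert k chunk, st.2 - chunk.length)) (PySem.Dict.empty, 5)).1.items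

-- ===== PRECONDITION & SPEC =====
def Spec_get_testing_subset (groups : List (String × List String)) (out : List (String × List String)) : Prop := out = get_testing_subset_alt groups
instance (groups : List (String × List String)) (out : List (String × List String)) : Decidable (Spec_get_testing_subset groups out) := by unfold Spec_get_testing_subset; infer_instance

-- ===== CLAIM (what is proved, stated in full; the proofs are below) =====
def Claim_equal_get_testing_subset : Prop := ∀ (groups : List (String × List String)), Dom_get_testing_subset groups → Spec_get_testing_subset groups (get_testing_subset groups)

-- ===== LEMMAS AND PROOFS =====

-- A's inner loop with count t collects the first (5 - t) files and count becomes t + min (5 - t) |fs|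
theorem pvInnerA_eq (fs : List String) (acc : List String) (t : Nat) :
    pvInnerA fs acc t = (acc ++ fs.take (5 - t), t + min (5 - t) fs.length) := by
  induction fs generalizing acc t with
  | nil => simp [pvInnerA]
  | cons f rest ih =>
    by_cases h : 5 ≤ t
    · have h0 : 5 - t = 0 := by omega
      simp [pvInnerA, h, h0]
    · have h1 : 5 - t = (5 - (t + 1)) + 1 := by omega
      simp only [pvInnerA, if_neg h, ih]
      rw [h1, List.take_succ_cons]
      simp only [Prod.mk.injEq, List.append_assoc, List.singleton_append, List.length_cons]
      exact ⟨by trivial, by omega⟩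

-- the two folds agree on the dict component whenever B's budget is 5 - t (with t ≤ 5)
theorem pvFold_eq (d : PySem.Dict String (List String)) (ks : List String)
    (subset : PySem.Dict String (List String)) (t : Nat) (ht : t ≤ 5) :
    (ks.foldl (fun (st : PySem.Dict String (List String) × Nat) k =>
        let r := pvInnerA (d.getD k []) [] st.2
        (st.1.insert k r.1, r.2)) (subset, t)).1
    = (ks.foldl (fun (st : PySem.Dict String (List String) × Nat) k =>
        let chunk := (d.getD k []).take st.2
        (st.1.insert k chunk, st.2 - chunk.length)) (subset, 5 - t)).1 := by
  induction ks generalizing subset t with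
  | nil => simp
  | cons k rest ih =>
    rw [List.foldl_cons, List.foldl_cons]
    have e1 : (let r := pvInnerA (d.getD k []) [] ((subset, t) : PySem.Dict String (List String) × Nat).2
          (((subset, t) : PySem.Dict String (List String) × Nat).1.insert k r.1, r.2))
        = (subset.insert k ((d.getD k []).take (5 - t)),
            t + min (5 - t) (d.getD k []).length) := by
      simp only [pvInnerA_eq, List.nil_append]
    have e2 : (let chunk := (d.getD k []).take ((subset, 5 - t) : PySem.Dict String (List String) × Nat).2
          (((subset, 5 - t) : PySem.Dict String (List String) × Nat).1.insert k chunk,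
            ((subset, 5 - t) : PySem.Dict String (List String) × Nat).2 - chunk.length))
        = (subset.insert k ((d.getD k []).take (5 - t)),
            5 - (t + min (5 - t) (d.getD k []).length)) := by
      simp only [List.length_take, Prod.mk.injEq]
      exact ⟨by trivial, by omega⟩
    rw [e1, e2]
    exact ih _ _ (by omega)

-- ===== VERDICT (by name: the statement is the Claim_ definition above) =====
theorem get_testing_subset_spec : Claim_equal_get_testing_subset := by
  intro groups _
  unfold Spec_get_testing_subset get_testing_subset get_testing_subset_alt
  simp only []
  rw [pvFold_eq _ _ _ 0 (by omega)]
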